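-- pv_equiv track=rewrite | github.com/sojaeheon/algorithm_study | 9월/3주차/20250925/jaeheon.py | sort_c
-- ===== SOURCE A (Python) =====
-- def sort_c(arr):
--     rows, cols = len(arr), len(arr[0])
--     new_arr = [[0] * cols for _ in range(0)]  # 나중에 append
--     max_len = 0
--     cols_result = []
--
--     for c in range(cols):
--         num_cnt = {}
--         for r in range(rows):
--             if arr[r][c] == 0:
--                 continue
--             num_cnt[arr[r][c]] = num_cnt.get(arr[r][c], 0) + 1
--
--         sort_num = sorted(num_cnt.items(), key=lambda x: (x[1], x[0]))
--
--         new_col = []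
--         for k, v in sort_num:
--             new_col.extend([k, v])
--
--         new_col = new_col[:100]
--         cols_result.append(new_col)
--         max_len = max(max_len, len(new_col))
--
--     # 이제 결과를 행렬로 다시 만들기
--     new_arr = [[0] * cols for _ in range(max_len)]
--     for c in range(cols):
--         for r in range(len(cols_result[c])):
--             new_arr[r][c] = cols_result[c][r]
--
--     return new_arr
-- ===== SOURCE B (Python) =====
-- def sort_c(arr):
--     cols_result = []
--     for c in range(len(arr[0])):
--         nz = sorted(row[c] for row in arr if row[c] != 0)
--         # run-length encode the sorted column: (count, value) pairs
--         runs = []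
--         for v in nz:
--             if runs and runs[-1][1] == v:
--                 runs[-1] = (runs[-1][0] + 1, v)
--             else:
--                 runs.append((1, v))
--         runs.sort(key=lambda p: (p[0], p[1]))
--         flat = []
--         for cnt, val in runs:
--             flat += [val, cnt]
--         cols_result.append(flat[:100])
--     return _transpose_pad(cols_result)
--
-- def _transpose_pad(cols):
--     if all(len(col) == 0 for col in cols):
--         return []
--     return [[(col[0] if col else 0) for col in cols]] + _transpose_pad([col[1:] for col in cols])
-- ===== Notes on version B (the rewrite author's own statement) =====
-- stated objective: alternative
-- what changed: Per column B replaces the dict-counting pass by sort-then-run-length-encode (sort the nonzero entries, fold adjacent equal values into (count,value) runs, sort the runs), and replaces the pre-allocated zero matrix with column-major index assignment by a recursive peel-the-heads padded transpose of the per-column lists.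
import Mathlib
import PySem

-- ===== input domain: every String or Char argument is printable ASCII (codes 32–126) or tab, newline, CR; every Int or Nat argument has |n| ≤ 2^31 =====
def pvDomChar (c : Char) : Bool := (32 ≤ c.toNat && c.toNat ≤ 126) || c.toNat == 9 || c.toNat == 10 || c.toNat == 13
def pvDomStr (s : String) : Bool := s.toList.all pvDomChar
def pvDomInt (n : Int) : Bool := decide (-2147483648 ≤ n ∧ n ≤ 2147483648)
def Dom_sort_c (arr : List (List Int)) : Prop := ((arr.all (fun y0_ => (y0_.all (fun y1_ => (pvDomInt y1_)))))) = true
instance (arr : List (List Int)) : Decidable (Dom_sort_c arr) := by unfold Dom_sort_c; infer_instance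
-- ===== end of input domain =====

-- B replaces A's per-column dict counting by sort-then-run-length-encode (sort the nonzero
-- entries, fold adjacent equal values into (count,value) runs, sort the runs), and replaces
-- A's pre-allocated zero matrix with column-major index assignment by a recursive
-- peel-the-heads padded transpose (objective: alternative).

-- ===== PORT A =====
-- per-column body of A's first loop: count nonzeros into a dict, sort items by (count, value),
-- flatten to [k1,v1,k2,v2,…] and truncate to 100  (the `continue` is the `if x = 0` branch)
def aNewCol (arr : List (List Int)) (c : Int) : List Int :=
  let num_cnt := (PySem.List.pyRange 0 (arr.length : Int)).foldl (fun d r =>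
      let x := PySem.List.pyGetD (PySem.List.pyGetD arr r []) c 0
      if x = 0 then d else d.insert x (d.getD x 0 + 1)) PySem.Dict.empty
  let sort_num := PySem.List.sorted2 num_cnt.items (fun p => p.2) (fun p => p.1)
  let new_col := sort_num.foldl (fun l p => l ++ [p.1, p.2]) []
  PySem.List.slice new_col none (some 100)

-- A's `new_arr = [[0]*cols for _ in range(0)]` is dead code (immediately rebound) and is not ported.
def sort_c (arr : List (List Int)) : List (List Int) :=
  let cols : Int := ((PySem.List.pyGetD arr 0 []).length : Int)
  let s := (PySem.List.pyRange 0 cols).foldl (fun s c =>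
      let new_col := aNewCol arr c
      (s.1 ++ [new_col], max s.2 (new_col.length : Int))) (([] : List (List Int)), (0 : Int))
  let cols_result := s.1
  let max_len := s.2
  let new_arr := (PySem.List.pyRange 0 max_len).map (fun _ => List.replicate cols.toNat (0 : Int))
  (PySem.List.pyRange 0 cols).foldl (fun na c =>
    (PySem.List.pyRange 0 ((PySem.List.pyGetD cols_result c []).length : Int)).foldl (fun na2 r =>
      PySem.List.pySetD na2 r (PySem.List.pySetD (PySem.List.pyGetD na2 r []) c
        (PySem.List.pyGetD (PySem.List.pyGetD cols_result c []) r 0))) na) new_arr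

-- ===== PORT B =====
-- B's inner RLE step: merge v into the last run if it has the same value, else open a run (1, v)
def bStep (runs : List (Int × Int)) (v : Int) : List (Int × Int) :=
  match runs.getLast? with
  | some p => if p.2 = v then runs.dropLast ++ [(p.1 + 1, v)] else runs ++ [(1, v)]
  | none => runs ++ [(1, v)]

-- per-column body of B: sort the nonzero entries, run-length encode, sort the (count,value)
-- runs, flatten each run as value,count, truncate to 100
def bFlat (arr : List (List Int)) (c : Nat) : List Int :=
  let nz := PySem.List.sorted ((arr.map (fun row => PySem.List.pyGetD row (c : Int) 0)).filter
      (fun v => decide (v ≠ 0))) (fun v => v)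
  let runs := nz.foldl bStep []
  let runs2 := PySem.List.sorted2 runs (fun p => p.1) (fun p => p.2)
  let flat := runs2.foldl (fun l p => l ++ [p.2, p.1]) []
  PySem.List.slice flat none (some 100)

-- termination measure for bTranspose: peeling the heads strictly shrinks the total length
theorem pv_tails_len (cols : List (List Int)) :
    ((cols.map (fun col => PySem.List.slice col (some 1) none)).map List.length)
      = cols.map (fun col => col.length - 1) := by
  rw [List.map_map]
  apply List.map_congr_left
  intro col _
  simp [PySem.List.slice_from_one]

theorem pv_tails_sum_lt (cols : List (List Int))
    (h : ¬ (cols.all (fun col => col.length == 0)) = true) :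
    ((cols.map (fun col => PySem.List.slice col (some 1) none)).map List.length).sum
      < (cols.map List.length).sum := by
  rw [pv_tails_len]
  induction cols with
  | nil => simp at h
  | cons c cs ih =>
      simp only [List.all_cons, Bool.and_eq_true, beq_iff_eq, not_and_or] at h
      have hle : ∀ (l : List (List Int)),
          (l.map (fun col => col.length - 1)).sum ≤ (l.map List.length).sum := by
        intro l
        induction l with
        | nil => simp
        | cons x xs ihx => simp only [List.map_cons, List.sum_cons]; omega
      rcases h with h | h
      · have := hle cs
        simp only [List.map_cons, List.sum_cons]
        omega
      · have := ih h
        simp only [List.map_cons, List.sum_cons]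
        omega

-- Python helper _transpose_pad: emit the row of heads (0-padded), recurse on the tails
def bTranspose (cols : List (List Int)) : List (List Int) :=
  if h : (cols.all (fun col => col.length == 0)) = true then []
  else (cols.map (fun col => col.headD 0)) ::
    bTranspose (cols.map (fun col => PySem.List.slice col (some 1) none))
termination_by (cols.map List.length).sum
decreasing_by simpa using pv_tails_sum_lt cols h

def sort_c_alt (arr : List (List Int)) : List (List Int) :=
  bTranspose ((List.range (PySem.List.pyGetD arr 0 []).length).map (bFlat arr))

-- ===== PRECONDITION & SPEC =====
-- Pre_ excludes exactly the inputs where Python A raises IndexError: the empty matrix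
-- (arr[0]) and ragged inputs whose later rows are shorter than the first row (arr[r][c]).
def Pre_sort_c (arr : List (List Int)) : Prop :=
  arr ≠ [] ∧ ∀ row ∈ arr, (arr.headD []).length ≤ row.length
instance (arr : List (List Int)) : Decidable (Pre_sort_c arr) := by unfold Pre_sort_c; infer_instance
def pvWitness_sort_c : List (List Int) := [[1, 0], [2, 1]]

def Spec_sort_c (arr : List (List Int)) (out : List (List Int)) : Prop := out = sort_c_alt arr
instance (arr : List (List Int)) (out : List (List Int)) : Decidable (Spec_sort_c arr out) := by unfold Spec_sort_c; infer_instance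

-- ===== CLAIM (what is proved, stated in full; the proofs are below) =====
def Claim_equal_sort_c : Prop := ∀ (arr : List (List Int)), Dom_sort_c arr → Pre_sort_c arr → Spec_sort_c arr (sort_c arr)

-- ===== LEMMAS AND PROOFS =====

-- insertBy commutes with mapping an embedding that translates the comparison
theorem pv_insertBy_map {α β : Type} (g : α → β) (p : α → α → Bool) (q : β → β → Bool)
    (h : ∀ a b, q (g a) (g b) = p a b) (x : α) (l : List α) :
    PySem.List.insertBy q (g x) (l.map g) = (PySem.List.insertBy p x l).map g := by
  induction l with
  | nil => simp [PySem.List.insertBy]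
  | cons y ys ih =>
      by_cases hp : p x y = true
      · simp [PySem.List.insertBy, h, hp]
      · simp [PySem.List.insertBy, h, hp, ih]

theorem pv_foldl_insertBy_map {α β : Type} (g : α → β) (p : α → α → Bool) (q : β → β → Bool)
    (h : ∀ a b, q (g a) (g b) = p a b) (xs : List α) (acc : List α) :
    (xs.map g).foldl (fun a y => PySem.List.insertBy q y a) (acc.map g)
      = (xs.foldl (fun a x => PySem.List.insertBy p x a) acc).map g := by
  induction xs generalizing acc with
  | nil => simp
  | cons x xs ih =>
      simp only [List.map_cons, List.foldl_cons]
      rw [pv_insertBy_map g p q h x acc, ih]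

-- sorting pairs (k, f k) by (snd, fst) is sorting the keys by (f ·, id), then pairing
theorem pv_sorted2_map_pair (f : Int → Int) (vals : List Int) :
    PySem.List.sorted2 (vals.map (fun k => (k, f k))) (fun p => p.2) (fun p => p.1)
      = (PySem.List.sorted2 vals (fun v => f v) (fun v => v)).map (fun k => (k, f k)) := by
  show (vals.map (fun k => (k, f k))).foldl
      (fun a y => PySem.List.insertBy
        (fun x y => decide (x.2 < y.2) || (!decide (y.2 < x.2) && decide (x.1 < y.1))) y a) []
    = (vals.foldl (fun a x => PySem.List.insertBy
        (fun x y => decide (f x < f y) || (!decide (f y < f x) && decide (x < y))) x a) []).map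
        (fun k => (k, f k))
  exact pv_foldl_insertBy_map (fun k => (k, f k)) _ _ (fun a b => rfl) vals []

-- sorting pairs (f k, k) by (fst, snd) is sorting the keys by (f ·, id), then pairing
theorem pv_sorted2_map_pair' (f : Int → Int) (vals : List Int) :
    PySem.List.sorted2 (vals.map (fun k => (f k, k))) (fun p => p.1) (fun p => p.2)
      = (PySem.List.sorted2 vals (fun v => f v) (fun v => v)).map (fun k => (f k, k)) := by
  show (vals.map (fun k => (f k, k))).foldl
      (fun a y => PySem.List.insertBy
        (fun x y => decide (x.1 < y.1) || (!decide (y.1 < x.1) && decide (x.2 < y.2))) y a) []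
    = (vals.foldl (fun a x => PySem.List.insertBy
        (fun x y => decide (f x < f y) || (!decide (f y < f x) && decide (x < y))) x a) []).map
        (fun k => (f k, k))
  exact pv_foldl_insertBy_map (fun k => (f k, k)) _ _ (fun a b => rfl) vals []

-- the two-key sort is the one-key sort by the lexicographic pair key
theorem pv_sorted2_int_lex (xs : List Int) (f : Int → Int) :
    PySem.List.sorted2 xs (fun v => f v) (fun v => v)
      = PySem.List.sorted xs (fun v => toLex (f v, v)) := by
  have h : ∀ a b : Int,
      (decide (toLex (f a, a) < toLex (f b, b)))
        = (decide (f a < f b) || (!decide (f b < f a) && decide (a < b))) := by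
    intro a b
    by_cases h1 : f a < f b
    · simp [Prod.Lex.lt_iff, h1]
    · by_cases h2 : f b < f a
      · simp [Prod.Lex.lt_iff, h1, h2]
        omega
      · have h3 : f a = f b := le_antisymm (not_lt.mp h2) (not_lt.mp h1)
        simp [Prod.Lex.lt_iff, h3]
  have := pv_foldl_insertBy_map (fun v : Int => v)
      (fun x y => decide (f x < f y) || (!decide (f y < f x) && decide (x < y)))
      (fun x y => decide (toLex (f x, x) < toLex (f y, y))) (fun a b => h a b) xs []
  simpa using this.symm

-- dedup (first occurrences) is a sublist of the original list
theorem pv_foldl_add_sublist (l acc : List Int) :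
    (l.foldl PySem.Set.add acc).Sublist (acc ++ l) := by
  induction l generalizing acc with
  | nil => simp
  | cons x t ih =>
      simp only [List.foldl_cons]
      refine (ih (PySem.Set.add acc x)).trans ?_
      unfold PySem.Set.add
      split
      · exact (List.Sublist.cons _ (List.Sublist.refl t)).append_left acc
      · rw [List.append_assoc]
        exact List.Sublist.refl _

theorem pv_ofList_sublist (l : List Int) : (PySem.Set.ofList l).Sublist l := by
  simpa using pv_foldl_add_sublist l []

-- a strictly increasing list containing its upper bound x ends in x, and only there
theorem pv_last_max (D : List Int) (x : Int) (hD : D.Pairwise (· < ·)) (hx : x ∈ D)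
    (hub : ∀ y ∈ D, y ≤ x) : D = D.dropLast ++ [x] ∧ x ∉ D.dropLast := by
  induction D using List.reverseRecOn with
  | nil => simp at hx
  | append_singleton init last ih =>
      rcases List.mem_append.mp hx with hx' | hx'
      · exfalso
        have hlt : x < last := (List.pairwise_append.mp hD).2.2 x hx' last (by simp)
        have : last ≤ x := hub last (by simp)
        omega
      · have hxl : x = last := by simpa using hx'
        subst hxl
        rw [List.dropLast_concat]
        refine ⟨rfl, fun hmem => ?_⟩
        have := (List.pairwise_append.mp hD).2.2 x hmem x (by simp)
        omega

-- RLE of a (≤)-sorted list: one (count, value) run per distinct value, in order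
theorem pv_runs_sorted (l : List Int) (hl : l.Pairwise (· ≤ ·)) :
    l.foldl bStep [] = (PySem.Set.ofList l).map (fun k => ((l.count k : Int), k)) := by
  induction l using List.reverseRecOn with
  | nil => rfl
  | append_singleton t x ih =>
      have hp := List.pairwise_append.mp hl
      have ht : t.Pairwise (· ≤ ·) := hp.1
      have hub : ∀ y ∈ t, y ≤ x := fun y hy => hp.2.2 y hy x (by simp)
      rw [List.foldl_append, List.foldl_cons, List.foldl_nil, ih ht]
      have hof : PySem.Set.ofList (t ++ [x]) = PySem.Set.add (PySem.Set.ofList t) x := by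
        simp [PySem.Set.ofList_eq_foldl, List.foldl_append]
      by_cases hx : x ∈ t
      · -- x repeats the last run: bump its count
        have hD : (PySem.Set.ofList t).Pairwise (· < ·) := by
          have hle : (PySem.Set.ofList t).Pairwise (· ≤ ·) := ht.sublist (pv_ofList_sublist t)
          have hne : (PySem.Set.ofList t).Pairwise (· ≠ ·) := PySem.Set.nodup_ofList t
          exact (hle.and hne).imp (fun hab => lt_of_le_of_ne hab.1 hab.2)
        obtain ⟨hsplit, hnot⟩ := pv_last_max (PySem.Set.ofList t) x hD
            ((PySem.Set.mem_ofList t x).mpr hx)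
            (fun y hy => hub y ((PySem.Set.mem_ofList t y).mp hy))
        have hadd : PySem.Set.add (PySem.Set.ofList t) x = PySem.Set.ofList t := by
          simp [PySem.Set.add, PySem.Set.contains, PySem.Set.mem_ofList, hx]
        rw [hof, hadd]
        calc bStep ((PySem.Set.ofList t).map (fun k => ((t.count k : Int), k))) x
            = bStep (((PySem.Set.ofList t).dropLast ++ [x]).map
                (fun k => ((t.count k : Int), k))) x := by rw [← hsplit]
          _ = ((PySem.Set.ofList t).dropLast).map (fun k => ((t.count k : Int), k))
                ++ [(((t.count x : Int)) + 1, x)] := by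
              rw [List.map_append, List.map_singleton]
              unfold bStep
              rw [List.getLast?_concat]
              simp
          _ = (PySem.Set.ofList t).map (fun k => (((t ++ [x]).count k : Int), k)) := by
              conv_rhs => rw [hsplit]
              rw [List.map_append, List.map_singleton]
              congr 1
              · apply List.map_congr_left
                intro k hk
                have hkx : k ≠ x := fun h => hnot (h ▸ hk)
                have : (t ++ [x]).count k = t.count k := by
                  rw [List.count_append]
                  simp [List.count_singleton]
                  omega
                rw [this]
              · have : (t ++ [x]).count x = t.count x + 1 := by
                  rw [List.count_append]
                  simp [List.count_singleton]
                rw [this]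
                push_cast
                rfl
      · -- x opens a fresh run at the end
        have hadd : PySem.Set.add (PySem.Set.ofList t) x = PySem.Set.ofList t ++ [x] := by
          simp [PySem.Set.add, PySem.Set.contains, PySem.Set.mem_ofList, hx]
        have hstep : bStep ((PySem.Set.ofList t).map (fun k => ((t.count k : Int), k))) x
            = (PySem.Set.ofList t).map (fun k => ((t.count k : Int), k)) ++ [(1, x)] := by
          cases hgl : ((PySem.Set.ofList t).map (fun k => ((t.count k : Int), k))).getLast? with
          | none => unfold bStep; rw [hgl]
          | some p =>
              obtain ⟨d, hd, rfl⟩ := List.mem_map.mp (List.mem_of_getLast? hgl)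
              have hdt : d ∈ t := (PySem.Set.mem_ofList t d).mp hd
              have hne : d ≠ x := fun h => hx (h ▸ hdt)
              unfold bStep
              rw [hgl]
              simp [hne]
        rw [hstep, hof, hadd, List.map_append, List.map_singleton]
        congr 1
        · apply List.map_congr_left
          intro k hk
          have hkx : k ≠ x := fun h => hx (h ▸ (PySem.Set.mem_ofList t k).mp hk)
          have : (t ++ [x]).count k = t.count k := by
            rw [List.count_append]
            simp [List.count_singleton]
            omega
          rw [this]
        · have : (t ++ [x]).count x = t.count x + 1 := by
            rw [List.count_append]
            simp [List.count_singleton]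
          rw [this, List.count_eq_zero.mpr hx]
          rfl

-- A's per-column value equals B's per-column value
theorem pv_colEq (arr : List (List Int)) (c : Nat) : aNewCol arr (c : Int) = bFlat arr c := by
  simp only [aNewCol, bFlat]
  have hdict : (PySem.List.pyRange 0 (arr.length : Int)).foldl
      (fun (d : PySem.Dict Int Int) r =>
        if PySem.List.pyGetD (PySem.List.pyGetD arr r []) (c : Int) 0 = 0 then d
        else d.insert (PySem.List.pyGetD (PySem.List.pyGetD arr r []) (c : Int) 0)
          (d.getD (PySem.List.pyGetD (PySem.List.pyGetD arr r []) (c : Int) 0) 0 + 1))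
      PySem.Dict.empty
      = arr.foldl (fun d row =>
        if PySem.List.pyGetD row (c : Int) 0 = 0 then d
        else d.insert (PySem.List.pyGetD row (c : Int) 0)
          (d.getD (PySem.List.pyGetD row (c : Int) 0) 0 + 1)) PySem.Dict.empty :=
    PySem.List.foldl_pyRange_zero_pyGetD' arr ([] : List Int)
      (fun (d : PySem.Dict Int Int) row =>
        if PySem.List.pyGetD row (c : Int) 0 = 0 then d
        else d.insert (PySem.List.pyGetD row (c : Int) 0)
          (d.getD (PySem.List.pyGetD row (c : Int) 0) 0 + 1)) PySem.Dict.empty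
  rw [hdict]
  have h1 : arr.foldl (fun (d : PySem.Dict Int Int) row =>
        if PySem.List.pyGetD row (c : Int) 0 = 0 then d
        else d.insert (PySem.List.pyGetD row (c : Int) 0)
          (d.getD (PySem.List.pyGetD row (c : Int) 0) 0 + 1)) PySem.Dict.empty
      = (arr.map (fun row => PySem.List.pyGetD row (c : Int) 0)).foldl
          (fun (d : PySem.Dict Int Int) x => if x = 0 then d else d.insert x (d.getD x 0 + 1)) PySem.Dict.empty := by
    rw [List.foldl_map]
  rw [h1]
  set col := arr.map (fun row => PySem.List.pyGetD row (c : Int) 0) with hcol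
  have h2 : col.foldl (fun (d : PySem.Dict Int Int) x => if x = 0 then d else d.insert x (d.getD x 0 + 1))
        PySem.Dict.empty
      = (col.filter (fun v => decide (v ≠ 0))).foldl
          (fun d x => d.insert x (d.getD x 0 + 1)) PySem.Dict.empty := by
    rw [List.foldl_filter]
    congr 1
    funext d x
    by_cases hx : x = 0 <;> simp [hx]
  rw [h2, PySem.Dict.foldl_insert_getD_add_one_eq_counter, PySem.Dict.items_counter]
  set nz0 := col.filter (fun v => decide (v ≠ 0)) with hnz0
  set f : Int → Int := fun k => ((nz0.count k : Nat) : Int) with hf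
  -- A side: sort the (value, count) items by (count, value), flatten value-then-count
  rw [pv_sorted2_map_pair f (PySem.Set.ofList nz0),
      PySem.List.foldl_append_eq_flatMap, List.nil_append, List.flatMap_map]
  -- B side: run-length encode the sorted column, sort the (count, value) runs
  set nz := PySem.List.sorted nz0 (fun v => v) with hnz
  have hsortpw : nz.Pairwise (· ≤ ·) := by
    have := PySem.List.sorted_pairwise nz0 (fun v => v)
    simpa [hnz] using this
  rw [pv_runs_sorted nz hsortpw]
  have hcnt : ((PySem.Set.ofList nz).map (fun k => ((nz.count k : Int), k)))
      = (PySem.Set.ofList nz).map (fun k => (f k, k)) := by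
    apply List.map_congr_left
    intro k _
    have : nz.count k = nz0.count k := (PySem.List.sorted_perm nz0 (fun v => v) false).count_eq k
    rw [hf, this]
  rw [hcnt, pv_sorted2_map_pair' f (PySem.Set.ofList nz),
      PySem.List.foldl_append_eq_flatMap, List.nil_append, List.flatMap_map]
  -- the two dedup lists are permutations, and the lex sort ignores the order
  have hperm : (PySem.Set.ofList nz).Perm (PySem.Set.ofList nz0) := by
    refine (List.perm_ext_iff_of_nodup (PySem.Set.nodup_ofList nz)
        (PySem.Set.nodup_ofList nz0)).mpr ?_
    intro a
    rw [PySem.Set.mem_ofList, PySem.Set.mem_ofList, hnz, PySem.List.mem_sorted]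
  have hinj : Function.Injective (fun v : Int => toLex (f v, v)) := by
    intro a b hab
    have := congrArg (fun p => (ofLex p).2) hab
    simpa using this
  have hsorteq : PySem.List.sorted2 (PySem.Set.ofList nz) f (fun v => v)
      = PySem.List.sorted2 (PySem.Set.ofList nz0) f (fun v => v) := by
    rw [pv_sorted2_int_lex, pv_sorted2_int_lex]
    exact PySem.List.sorted_eq_sorted_of_perm _ _ _ hinj hperm
  rw [hsorteq]

-- A's first loop with its pair accumulator, split into the list part and the running max
theorem pv_pairFold {α : Type} (h : α → List Int) (xs : List α) (cr : List (List Int)) (m : Int) :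
    xs.foldl (fun s c => (s.1 ++ [h c], max s.2 ((h c).length : Int))) (cr, m)
      = (cr ++ xs.map h, (xs.map (fun c => ((h c).length : Int))).foldl max m) := by
  induction xs generalizing cr m with
  | nil => simp
  | cons x xs ih => simp [ih]

-- max over Int casts of Nats is the cast of the Nat max
theorem pv_castFoldMax (L : List Nat) (a : Nat) :
    (L.map (fun k : Nat => (k : Int))).foldl max (a : Int) = ((L.foldl max a : Nat) : Int) := by
  induction L generalizing a with
  | nil => simp
  | cons x xs ih =>
      simp only [List.map_cons, List.foldl_cons]
      have hmax : (max (a : Int) (x : Int)) = ((max a x : Nat) : Int) := by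
        simp [Nat.cast_max]
      rw [hmax, ih]

-- inner assignment loop: writing column c of v into the first v.length rows
theorem pv_setColPrefix (v : List Int) (c : Nat) (na : List (List Int)) (j : Nat) :
    (List.range j).foldl (fun na2 r => na2.set r ((na2.getD r []).set c (v.getD r 0))) na
      = na.mapIdx (fun r row => if r < j then row.set c (v.getD r 0) else row) := by
  induction j with
  | zero =>
      simp only [List.range_zero, List.foldl_nil]
      apply List.ext_getElem
      · simp
      · intro i hi hi'
        simp [List.getElem_mapIdx]
  | succ j ih =>
      rw [List.range_succ, List.foldl_append, ih]
      simp only [List.foldl_cons, List.foldl_nil]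
      by_cases hj : j < na.length
      · have hgd : (na.mapIdx (fun r row => if r < j then row.set c (v.getD r 0) else row)).getD j []
            = na[j] := by
          rw [List.getD_eq_getElem _ _ (by simpa using hj)]
          simp [List.getElem_mapIdx]
        rw [hgd]
        apply List.ext_getElem
        · simp
        · intro i hi hi'
          simp only [List.length_set, List.length_mapIdx] at hi hi'
          simp only [List.getElem_set, List.getElem_mapIdx]
          by_cases hij : j = i
          · subst hij
            simp
          · rw [if_neg hij]
            have : (i < j) = (i < j + 1) := by apply propext; constructor <;> intro <;> omega
            simp only [this]
      · rw [List.set_eq_of_length_le (by simpa using (by omega : na.length ≤ j))]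
        apply List.ext_getElem
        · simp
        · intro i hi hi'
          simp only [List.length_mapIdx] at hi hi'
          simp only [List.getElem_mapIdx]
          have : (i < j) = (i < j + 1) := by apply propext; constructor <;> intro <;> omega
          simp only [this]

-- one outer step writes column c
def pvColStep (CR : List (List Int)) (na : List (List Int)) (c : Nat) : List (List Int) :=
  na.mapIdx (fun r row => if r < (CR.getD c []).length then row.set c ((CR.getD c []).getD r 0) else row)

-- the outer assignment loop over the first k columns, on the m×n zero matrix
theorem pv_outerPrefix (CR : List (List Int)) (n m : Nat) (k : Nat) (hk : k ≤ n) :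
    (List.range k).foldl (pvColStep CR) ((List.range m).map (fun _ => List.replicate n (0 : Int)))
      = (List.range m).map (fun r => (List.range n).map
          (fun c => if c < k then (CR.getD c []).getD r (0 : Int) else 0)) := by
  induction k with
  | zero =>
      simp only [List.range_zero, List.foldl_nil]
      apply List.ext_getElem
      · simp
      · intro i hi hi'
        simp only [List.getElem_map, List.getElem_range]
        apply List.ext_getElem
        · simp
        · intro c hc hc'
          simp [List.getElem_replicate]
  | succ k ih =>
      rw [List.range_succ, List.foldl_append, ih (by omega)]
      simp only [List.foldl_cons, List.foldl_nil]
      unfold pvColStep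
      apply List.ext_getElem
      · simp
      · intro r hr hr'
        simp only [List.length_mapIdx, List.length_map, List.length_range] at hr hr'
        simp only [List.getElem_mapIdx, List.getElem_map, List.getElem_range]
        by_cases hrv : r < (CR.getD k []).length
        · simp only [if_pos hrv]
          apply List.ext_getElem
          · simp
          · intro c hc hc'
            simp only [List.length_set, List.length_map, List.length_range] at hc hc'
            rw [List.getElem_set]
            simp only [List.getElem_map, List.getElem_range]
            by_cases hck : k = c
            · subst hck
              simp
            · rw [if_neg hck]
              have : (c < k) = (c < k + 1) := by
                apply propext; constructor <;> intro <;> omega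
              simp [this]
        · simp only [if_neg hrv]
          apply List.ext_getElem
          · simp
          · intro c hc hc'
            simp only [List.length_map, List.length_range] at hc hc'
            simp only [List.getElem_map, List.getElem_range]
            by_cases hck : c = k
            · subst hck
              have h0 : (CR.getD c []).getD r (0 : Int) = 0 :=
                List.getD_eq_default _ _ (by omega)
              rw [if_pos (by omega : c < c + 1), if_neg (lt_irrefl c), h0]
            · have : (c < k) = (c < k + 1) := by
                apply propext; constructor <;> intro <;> omega
              simp only [this]

-- indexing a list through range of its length
theorem pv_mapGetD {β : Type} (L : List (List Int)) (f : List Int → β) :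
    (List.range L.length).map (fun c => f (L.getD c [])) = L.map f := by
  apply List.ext_getElem
  · simp
  · intro i hi hi'
    simp only [List.getElem_map, List.getElem_range]
    rw [List.getD_eq_getElem _ _ (by simpa using hi)]

-- foldl max 0 is 0 exactly on lists of zeros
theorem pv_foldl_max_zero_iff (L : List Nat) (a : Nat) :
    L.foldl max a = 0 ↔ (a = 0 ∧ ∀ x ∈ L, x = 0) := by
  induction L generalizing a with
  | nil => simp
  | cons x xs ih =>
      simp only [List.foldl_cons, ih, List.mem_cons]
      constructor
      · rintro ⟨h1, h2⟩
        exact ⟨by omega, fun y hy => by rcases hy with rfl | hy; omega; exact h2 y hy⟩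
      · rintro ⟨h1, h2⟩
        exact ⟨by have := h2 x (Or.inl rfl); omega, fun y hy => h2 y (Or.inr hy)⟩

-- peeling heads shifts the running max down by one
theorem pv_foldl_max_pred (L : List Nat) (a : Nat) :
    (L.map (fun x => x - 1)).foldl max (a - 1) = (L.foldl max a) - 1 := by
  induction L generalizing a with
  | nil => simp
  | cons x xs ih =>
      simp only [List.map_cons, List.foldl_cons]
      have : max (a - 1) (x - 1) = max a x - 1 := by omega
      rw [this, ih]

-- B's recursive padded transpose produces one row per index below the max length
theorem pv_transpose (m : Nat) : ∀ cols : List (List Int),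
    (cols.map List.length).foldl max 0 = m →
    bTranspose cols = (List.range m).map (fun r => cols.map (fun col => col.getD r 0)) := by
  induction m with
  | zero =>
      intro cols h
      have hall : (cols.all (fun col => col.length == 0)) = true := by
        rw [List.all_eq_true]
        intro col hcol
        have := ((pv_foldl_max_zero_iff (cols.map List.length) 0).mp h).2 col.length
            (List.mem_map.mpr ⟨col, hcol, rfl⟩)
        simpa using this
      rw [bTranspose, dif_pos hall]
      simp
  | succ m ih =>
      intro cols h
      have hne : ¬ (cols.all (fun col => col.length == 0)) = true := by
        intro hall
        rw [List.all_eq_true] at hall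
        have : (cols.map List.length).foldl max 0 = 0 := by
          rw [pv_foldl_max_zero_iff]
          refine ⟨rfl, fun x hxm => ?_⟩
          obtain ⟨col, hcol, rfl⟩ := List.mem_map.mp hxm
          simpa using hall col hcol
        omega
      rw [bTranspose, dif_neg hne]
      have htails : ((cols.map (fun col => PySem.List.slice col (some 1) none)).map
          List.length).foldl max 0 = m := by
        rw [pv_tails_len]
        have : cols.map (fun col => col.length - 1)
            = (cols.map List.length).map (fun x => x - 1) := by
          rw [List.map_map]
          rfl
        rw [this]
        have := pv_foldl_max_pred (cols.map List.length) 0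
        simpa [h] using this
      rw [ih _ htails, List.range_succ_eq_map, List.map_cons, List.map_map]
      congr 1
      · apply List.map_congr_left
        intro col _
        cases col <;> simp
      · apply List.map_congr_left
        intro r _
        rw [List.map_map]
        apply List.map_congr_left
        intro col _
        simp only [Function.comp_apply, PySem.List.slice_from_one]
        cases col <;> simp

-- ===== VERDICT helper: the main argument =====
theorem pv_main (arr : List (List Int)) : sort_c arr = sort_c_alt arr := by
  simp only [sort_c, sort_c_alt]
  set n := (PySem.List.pyGetD arr 0 []).length with hn
  set CR := (List.range n).map (bFlat arr) with hCR
  have hcols : (List.range n).map (fun (c : Nat) => aNewCol arr (c : Int)) = CR := by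
    rw [hCR]
    exact List.map_congr_left (fun c _ => pv_colEq arr c)
  set m := (CR.map List.length).foldl max 0 with hm
  have hfold : (PySem.List.pyRange 0 (n : Int)).foldl
      (fun s c => (s.1 ++ [aNewCol arr c], max s.2 ((aNewCol arr c).length : Int)))
      (([] : List (List Int)), (0 : Int)) = (CR, (m : Int)) := by
    rw [pv_pairFold (fun c : Int => aNewCol arr c) (PySem.List.pyRange 0 (n : Int)) [] 0,
        List.nil_append, PySem.List.pyRange_zero_nat n, List.map_map, List.map_map]
    have e1 : (List.range n).map ((fun c : Int => aNewCol arr c) ∘ (fun k : Nat => (k : Int)))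
        = CR := by
      rw [← hcols]
      rfl
    have e2 : (List.range n).map ((fun c : Int => ((aNewCol arr c).length : Int))
          ∘ (fun k : Nat => (k : Int)))
        = (CR.map List.length).map (fun k : Nat => (k : Int)) := by
      rw [← hcols, List.map_map, List.map_map]
      rfl
    rw [e1, e2, show ((0 : Int)) = ((0 : Nat) : Int) from rfl, pv_castFoldMax]
  rw [hfold]
  simp only []
  rw [PySem.List.pyRange_zero_nat m, List.map_map]
  have hinit : (List.range m).map ((fun _ => List.replicate ((n : Int)).toNat (0 : Int))
        ∘ (fun k : Nat => (k : Int)))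
      = (List.range m).map (fun _ => List.replicate n (0 : Int)) := by
    simp [Function.comp_def]
  rw [hinit, PySem.List.pyRange_zero_nat n, List.foldl_map]
  have hstep : ∀ (na : List (List Int)) (c : Nat),
      (PySem.List.pyRange 0 ((PySem.List.pyGetD CR (c : Int) []).length : Int)).foldl
        (fun na2 r => PySem.List.pySetD na2 r (PySem.List.pySetD (PySem.List.pyGetD na2 r []) (c : Int)
          (PySem.List.pyGetD (PySem.List.pyGetD CR (c : Int) []) r 0))) na
      = pvColStep CR na c := by
    intro na c
    rw [PySem.List.pyGetD_natCast CR c []]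
    rw [PySem.List.pyRange_zero_nat, List.foldl_map]
    have e : (fun (na2 : List (List Int)) (r : Nat) =>
        PySem.List.pySetD na2 (r : Int) (PySem.List.pySetD (PySem.List.pyGetD na2 (r : Int) []) (c : Int)
          (PySem.List.pyGetD (CR.getD c []) (r : Int) 0)))
        = fun na2 r => na2.set r ((na2.getD r []).set c ((CR.getD c []).getD r 0)) := by
      funext na2 r
      rw [PySem.List.pySetD_natCast, PySem.List.pyGetD_natCast, PySem.List.pySetD_natCast,
          PySem.List.pyGetD_natCast]
    rw [e, pv_setColPrefix]
    rfl
  rw [show (fun (na : List (List Int)) (c : Nat) =>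
      (PySem.List.pyRange 0 ((PySem.List.pyGetD CR (c : Int) []).length : Int)).foldl
        (fun na2 r => PySem.List.pySetD na2 r (PySem.List.pySetD (PySem.List.pyGetD na2 r []) (c : Int)
          (PySem.List.pyGetD (PySem.List.pyGetD CR (c : Int) []) r 0))) na)
      = pvColStep CR from funext fun na => funext fun c => hstep na c]
  rw [pv_outerPrefix CR n m n (le_refl n)]
  rw [pv_transpose m CR hm.symm]
  apply List.map_congr_left
  intro r _
  have hCRlen : CR.length = n := by rw [hCR]; simp
  calc (List.range n).map (fun c => if c < n then (CR.getD c []).getD r (0 : Int) else 0)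
      = (List.range n).map (fun c => (CR.getD c []).getD r (0 : Int)) := by
        apply List.map_congr_left
        intro c hc
        rw [if_pos (List.mem_range.mp hc)]
    _ = CR.map (fun col => col.getD r 0) := by
        rw [← hCRlen]
        exact pv_mapGetD CR (fun col => col.getD r 0)
-- ===== VERDICT (by name: the statement is the Claim_ definition above) =====
theorem sort_c_spec : Claim_equal_sort_c := by
  intro arr _ _
  unfold Spec_sort_c
  exact pv_main arr
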